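-- pv_equiv track=rewrite | github.com/davhin/dsa-puzzles | 2022/day8.py | hidden_trees_from_side
-- ===== SOURCE A (Python) =====
-- def hidden_trees_from_side(trees: list):
--     hidden_trees = []
--     for line in trees:
--         hidden_trees_in_line = []
--         tree_max = 0
--         for tree in line:
--             if tree <= tree_max:
--                 hidden_trees_in_line.append(1)
--             else:
--                 hidden_trees_in_line.append(0)
--                 tree_max = tree
--         hidden_trees.append(hidden_trees_in_line)
--     return hidden_trees
-- ===== SOURCE B (Python) =====
-- def hidden_trees_from_side(trees: list):
--     # A tree is hidden iff it is not strictly taller than every tree before it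
--     # (with height 0 as the baseline): check its whole prefix directly.
--     return [
--         [1 if t <= 0 or any(p >= t for p in line[:i]) else 0
--          for i, t in enumerate(line)]
--         for line in trees
--     ]
-- ===== Notes on version B (the rewrite author's own statement) =====
-- stated objective: alternative
-- what changed: Replaces A's stateful running-max loop with a stateless per-element prefix scan: tree i is marked hidden iff it is <= 0 or some earlier tree in line[:i] is >= it, so no accumulator is maintained at all.
import Mathlib
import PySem

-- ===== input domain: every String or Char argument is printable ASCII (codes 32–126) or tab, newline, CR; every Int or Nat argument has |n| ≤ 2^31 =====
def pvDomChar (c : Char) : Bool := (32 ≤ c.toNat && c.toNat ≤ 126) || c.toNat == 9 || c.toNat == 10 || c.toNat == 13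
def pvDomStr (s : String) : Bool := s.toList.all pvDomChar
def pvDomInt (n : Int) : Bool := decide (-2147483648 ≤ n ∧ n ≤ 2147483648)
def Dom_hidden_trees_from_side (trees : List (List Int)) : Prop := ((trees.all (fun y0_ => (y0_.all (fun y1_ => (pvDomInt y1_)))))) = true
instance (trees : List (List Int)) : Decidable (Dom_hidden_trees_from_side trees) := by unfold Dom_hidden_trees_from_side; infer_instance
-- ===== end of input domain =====

-- B drops A's running-max accumulator: each tree is judged hidden by scanning its own
-- prefix (hidden iff t <= 0 or some earlier tree >= t). Alternative, not faster.

-- ===== PORT A =====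
-- inner loop of A: state is (hidden_trees_in_line, tree_max)
def hidden_trees_from_side (trees : List (List Int)) : List (List Int) :=
  trees.foldl
    (fun hidden_trees line =>
      let st := line.foldl
        (fun (st : List Int × Int) tree =>
          if tree ≤ st.2 then (st.1 ++ [1], st.2) else (st.1 ++ [0], tree))
        ([], 0)
      hidden_trees ++ [st.1])
    []

-- ===== PORT B =====
-- per line: enumerate, and for tree t at index i check t <= 0 or any(p >= t for p in line[:i])
def hidden_trees_from_side_alt (trees : List (List Int)) : List (List Int) :=
  trees.map (fun line =>
    line.zipIdx.map (fun ti =>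
      if decide (ti.1 ≤ 0) || (line.take ti.2).any (fun p => decide (ti.1 ≤ p)) then (1 : Int) else 0))

-- ===== PRECONDITION & SPEC =====
def Spec_hidden_trees_from_side (trees : List (List Int)) (out : List (List Int)) : Prop := out = hidden_trees_from_side_alt trees
instance (trees : List (List Int)) (out : List (List Int)) : Decidable (Spec_hidden_trees_from_side trees out) := by unfold Spec_hidden_trees_from_side; infer_instance

-- ===== CLAIM (what is proved, stated in full; the proofs are below) =====
def Claim_equal_hidden_trees_from_side : Prop := ∀ (trees : List (List Int)), Dom_hidden_trees_from_side trees → Spec_hidden_trees_from_side trees (hidden_trees_from_side trees)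

-- ===== LEMMAS AND PROOFS =====

-- characterisation of A's inner loop: marks with a running max m
def pvMarkFrom (m : Int) : List Int → List Int
  | [] => []
  | t :: ts => (if t ≤ m then (1 : Int) else 0) :: pvMarkFrom (max m t) ts

-- A's inner fold, started at running max m with accumulator acc, is acc ++ pvMarkFrom m line.
theorem pv_inner_eq (line : List Int) : ∀ (m : Int) (acc : List Int),
    (line.foldl
      (fun (st : List Int × Int) tree =>
        if tree ≤ st.2 then (st.1 ++ [1], st.2) else (st.1 ++ [0], tree))
      (acc, m)).1
    = acc ++ pvMarkFrom m line := by
  induction line with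
  | nil => intro m acc; simp [pvMarkFrom]
  | cons t ts ih =>
    intro m acc
    by_cases h : t ≤ m
    · have hmax : max m t = m := max_eq_left h
      simp [List.foldl, pvMarkFrom, h, ih]
    · have hmax : max m t = t := max_eq_right (le_of_not_ge h)
      simp [List.foldl, pvMarkFrom, hmax, h, ih]

-- the running max m over the processed prefix `pre` is summed up by: s ≤ m ↔ s ≤ 0 ∨ some p in pre has s ≤ p
theorem pv_mark_eq_scan (suf : List Int) : ∀ (pre : List Int) (m : Int),
    (∀ s : Int, s ≤ m ↔ (s ≤ 0 ∨ pre.any (fun p => decide (s ≤ p)) = true)) →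
    pvMarkFrom m suf
    = (suf.zipIdx pre.length).map (fun ti =>
        if decide (ti.1 ≤ 0) || ((pre ++ suf).take ti.2).any (fun p => decide (ti.1 ≤ p)) then (1 : Int) else 0) := by
  induction suf with
  | nil => intro pre m _; simp [pvMarkFrom]
  | cons t ts ih =>
    intro pre m hm
    have htake : (pre ++ t :: ts).take pre.length = pre := by
      simp
    have hcond : (decide (t ≤ 0) || ((pre ++ t :: ts).take pre.length).any (fun p => decide (t ≤ p)))
        = decide (t ≤ m) := by
      rw [htake]
      by_cases h : t ≤ m
      · rcases (hm t).mp h with h0 | hp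
        · simp [h, h0]
        · simp [h, hp]
      · have hne : ¬ (t ≤ 0 ∨ pre.any (fun p => decide (t ≤ p)) = true) :=
          fun c => h ((hm t).mpr c)
        have h0 : ¬ t ≤ 0 := fun c => hne (Or.inl c)
        cases hb : pre.any (fun p => decide (t ≤ p)) with
        | true => exact absurd (Or.inr hb) hne
        | false => simp [h, h0]
    have hnext : ∀ s : Int, s ≤ max m t ↔ (s ≤ 0 ∨ (pre ++ [t]).any (fun p => decide (s ≤ p)) = true) := by
      intro s
      rw [List.any_append]
      simp only [Bool.or_eq_true, List.any_cons, List.any_nil, Bool.or_false, decide_eq_true_eq]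
      rw [le_max_iff, hm s]
      tauto
    have hrec := ih (pre ++ [t]) (max m t) hnext
    simp only [List.zipIdx_cons, List.map_cons, pvMarkFrom]
    rw [hcond]
    have hhead : (if t ≤ m then (1 : Int) else 0) = (if decide (t ≤ m) = true then 1 else 0) := by
      simp
    rw [hhead, hrec]
    simp only [List.append_assoc, List.cons_append, List.nil_append, List.length_append,
      List.length_cons, List.length_nil]

theorem pv_row_eq (line : List Int) :
    pvMarkFrom 0 line
    = line.zipIdx.map (fun ti =>
        if decide (ti.1 ≤ 0) || (line.take ti.2).any (fun p => decide (ti.1 ≤ p)) then (1 : Int) else 0) := by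
  have := pv_mark_eq_scan line [] 0 (by intro s; simp)
  simpa using this

-- A's outer fold with accumulator acc equals acc ++ B's map.
theorem pv_outer_eq (trees : List (List Int)) : ∀ (acc : List (List Int)),
    trees.foldl
      (fun hidden_trees line =>
        let st := line.foldl
          (fun (st : List Int × Int) tree =>
            if tree ≤ st.2 then (st.1 ++ [1], st.2) else (st.1 ++ [0], tree))
          ([], 0)
        hidden_trees ++ [st.1]) acc
    = acc ++ hidden_trees_from_side_alt trees := by
  induction trees with
  | nil => intro acc; simp [hidden_trees_from_side_alt]
  | cons l ls ih =>
    intro acc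
    simp only [List.foldl, hidden_trees_from_side_alt, List.map, ih]
    rw [pv_inner_eq l 0 [], pv_row_eq l]
    simp

-- ===== VERDICT (by name: the statement is the Claim_ definition above) =====
theorem hidden_trees_from_side_spec : Claim_equal_hidden_trees_from_side := by
  intro trees _
  unfold Spec_hidden_trees_from_side hidden_trees_from_side
  exact pv_outer_eq trees []
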